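-- pv_equiv track=rewrite | github.com/MichaelJSr/Elemental_Games_Modding | azurik_mod/randomizer/shufflers.py | _frag_parts
-- ===== SOURCE A (Python) =====
-- def _frag_parts(name: str) -> tuple[str, str] | None:
--     """Extract (element, number) from a fragment entity name.
--
--     frag_air_1 -> ("air", "1"), frag_earth_3 -> ("earth", "3")
--     """
--     if not name.startswith("frag_"):
--         return None
--     rest = name[5:]  # strip "frag_"
--     for elem in ["water", "air", "earth", "fire", "life"]:
--         if rest.startswith(elem + "_"):
--             num = rest[len(elem) + 1:]
--             if num.isdigit():
--                 return (elem, num)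
--     return None
-- ===== SOURCE B (Python) =====
-- _ELEMENTS = {"water", "air", "earth", "fire", "life"}
--
-- def _frag_parts(name: str) -> tuple[str, str] | None:
--     """Extract (element, number) from a fragment entity name.
--
--     frag_air_1 -> ("air", "1"), frag_earth_3 -> ("earth", "3")
--     """
--     if not name.startswith("frag_"):
--         return None
--     elem, sep, num = name[5:].partition("_")
--     if sep and elem in _ELEMENTS and num.isdigit():
--         return (elem, num)
--     return None
-- ===== Notes on version B (the rewrite author's own statement) =====
-- stated objective: idiomatic
-- what changed: Replaces the candidate-prefix scanning loop (try each element as a prefix of the rest) by a single partition on the first underscore followed by membership/digit validation.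
import Mathlib
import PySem

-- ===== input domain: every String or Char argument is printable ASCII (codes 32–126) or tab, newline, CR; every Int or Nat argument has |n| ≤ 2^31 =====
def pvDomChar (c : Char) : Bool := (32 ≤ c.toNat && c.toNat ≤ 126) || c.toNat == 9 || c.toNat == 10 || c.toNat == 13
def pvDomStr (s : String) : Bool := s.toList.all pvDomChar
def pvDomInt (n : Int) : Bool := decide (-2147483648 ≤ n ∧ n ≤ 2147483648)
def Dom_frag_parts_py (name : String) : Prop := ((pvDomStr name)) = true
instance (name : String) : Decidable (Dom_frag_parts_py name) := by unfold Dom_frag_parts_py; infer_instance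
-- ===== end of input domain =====

-- B replaces A's candidate-prefix scanning loop by one partition on the first '_' plus validation (idiomatic; return value only).

-- ===== PORT A =====
-- the for-loop over the candidate element list, in order; first prefix match that also passes isdigit wins
def fragLoopA (rest : String) : List String → Option (String × String)
  | [] => none
  | elem :: es =>
    if PySem.Str.startswith rest (elem ++ "_") then
      let num := PySem.Str.slice rest (some ((PySem.Str.len elem : Int) + 1)) none
      if PySem.Str.strIsdigit num then some (elem, num) else fragLoopA rest es
    else fragLoopA rest es

def frag_parts_py (name : String) : Option (String × String) :=
  if ¬ PySem.Str.startswith name "frag_" then none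
  else
    let rest := PySem.Str.slice name (some 5) none  -- name[5:]
    fragLoopA rest ["water", "air", "earth", "fire", "life"]

-- ===== PORT B =====
-- str.partition(sep) for a single-character sep, on code points: exact — Python splits at the
-- FIRST occurrence of sep; the middle component rendered as a Bool (sep found or not).
def pyPartitionChar (s : List Char) (c : Char) : List Char × Bool × List Char :=
  let pre := s.takeWhile (· ≠ c)
  match s.drop pre.length with
  | [] => (pre, false, [])
  | _ :: tl => (pre, true, tl)

def fragElementsB : List (List Char) :=
  ["water".toList, "air".toList, "earth".toList, "fire".toList, "life".toList]

-- the 'if sep and elem in _ELEMENTS and num.isdigit()' validation after the partition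
def fragValidateB : List Char × Bool × List Char → Option (String × String)
  | (elem, sep, num) =>
    if sep && fragElementsB.contains elem && PySem.Chars.strIsdigit num then
      some (String.ofList elem, String.ofList num)
    else none

def frag_parts_py_alt (name : String) : Option (String × String) :=
  if ¬ PySem.Str.startswith name "frag_" then none
  else fragValidateB (pyPartitionChar (name.toList.drop 5) '_')

-- ===== PRECONDITION & SPEC =====
def Spec_frag_parts_py (name : String) (out : Option (String × String)) : Prop := out = frag_parts_py_alt name
instance (name : String) (out : Option (String × String)) : Decidable (Spec_frag_parts_py name out) := by unfold Spec_frag_parts_py; infer_instance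

-- ===== CLAIM (what is proved, stated in full; the proofs are below) =====
def Claim_equal_frag_parts_py : Prop := ∀ (name : String), Dom_frag_parts_py name → Spec_frag_parts_py name (frag_parts_py name)

-- ===== LEMMAS AND PROOFS =====

theorem drop_len_takeWhile (p : Char → Bool) (l : List Char) :
    l.drop (l.takeWhile p).length = l.dropWhile p := by
  rw [List.dropWhile_eq_drop_findIdx_not, List.takeWhile_eq_take_findIdx_not, List.length_take]
  congr 1
  exact Nat.min_eq_left List.findIdx_le_length

theorem prefix_sep_iff (e pre tl : List Char) (he : '_' ∉ e) (hp : '_' ∉ pre) :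
    (e ++ ['_']) <+: (pre ++ '_' :: tl) ↔ e = pre := by
  induction e generalizing pre with
  | nil =>
    cases pre with
    | nil => simp
    | cons b pre' =>
      simp only [List.mem_cons, not_or] at hp
      simp [List.cons_prefix_cons, hp.1]
  | cons a e ih =>
    simp only [List.mem_cons, not_or] at he
    cases pre with
    | nil => simp [List.cons_prefix_cons, Ne.symm he.1]
    | cons b pre' =>
      simp only [List.mem_cons, not_or] at hp
      rw [List.cons_append, List.cons_append, List.cons_prefix_cons, ih pre' he.2 hp.2]
      simp

-- A's loop over the five candidates computes exactly B's partition-then-validate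
theorem sw_false_of_no_sep (l L : List Char) (hL : '_' ∈ L) (hl : '_' ∉ l) :
    PySem.Chars.startswith l L = false := by
  rw [Bool.eq_false_iff]
  intro h
  exact hl (((PySem.Chars.startswith_iff l L).mp h).subset hL)

theorem slice_after (rest : String) (e tl : List Char) (h : rest.toList = e ++ '_' :: tl)
    (n : Int) (hn : n = (e.length : Int) + 1) :
    PySem.List.slice rest.toList (some n) none = tl ∧
      PySem.Str.slice rest (some n) none = String.ofList tl := by
  have hdrop : PySem.List.slice rest.toList (some n) none = tl := by
    rw [PySem.List.slice_from _ (by omega), h,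
      show e ++ '_' :: tl = (e ++ ['_']) ++ tl by simp,
      show n.toNat = (e ++ ['_']).length by simp; omega, List.drop_left]
  refine ⟨hdrop, ?_⟩
  rw [← String.ofList_toList (s := PySem.Str.slice rest (some n) none)]
  congr 1
  rw [PySem.Str.toList_slice, PySem.Chars.slice_eq_listSlice, hdrop]

theorem dropWhile_head_false {α : Type} (p : α → Bool) (l : List α) (x : α) (tl : List α)
    (h : l.dropWhile p = x :: tl) : p x = false := by
  induction l with
  | nil => simp at h
  | cons a l ih =>
    rw [List.dropWhile_cons] at h
    split at h
    · exact ih h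
    · rename_i hpa
      cases h
      simpa using hpa

theorem loopA_eq_partition (rest : String) :
    fragLoopA rest ["water", "air", "earth", "fire", "life"] =
      fragValidateB (pyPartitionChar rest.toList '_') := by
  have hpre : '_' ∉ rest.toList.takeWhile (· ≠ '_') := by
    intro h
    simpa using List.mem_takeWhile_imp h
  simp only [pyPartitionChar]
  rw [drop_len_takeWhile]
  cases hd : rest.toList.dropWhile (· ≠ '_') with
  | nil =>
    have hlpre : rest.toList = rest.toList.takeWhile (· ≠ '_') := by
      conv_lhs => rw [← List.takeWhile_append_dropWhile (p := (· ≠ '_')) (l := rest.toList)]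
      rw [hd, List.append_nil]
    have hnosep : '_' ∉ rest.toList := by rw [hlpre]; exact hpre
    simp [fragLoopA, fragValidateB,
      sw_false_of_no_sep rest.toList ['w', 'a', 't', 'e', 'r', '_'] (by decide) hnosep,
      sw_false_of_no_sep rest.toList ['a', 'i', 'r', '_'] (by decide) hnosep,
      sw_false_of_no_sep rest.toList ['e', 'a', 'r', 't', 'h', '_'] (by decide) hnosep,
      sw_false_of_no_sep rest.toList ['f', 'i', 'r', 'e', '_'] (by decide) hnosep,
      sw_false_of_no_sep rest.toList ['l', 'i', 'f', 'e', '_'] (by decide) hnosep]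
  | cons x tl =>
    have hx : x = '_' := by
      have := dropWhile_head_false (fun c => c ≠ '_') rest.toList x tl hd
      simpa using this
    subst hx
    have hlsplit : rest.toList = rest.toList.takeWhile (· ≠ '_') ++ '_' :: tl := by
      conv_lhs => rw [← List.takeWhile_append_dropWhile (p := (· ≠ '_')) (l := rest.toList)]
      rw [hd]
    have hcond : ∀ e : List Char, '_' ∉ e →
        PySem.Chars.startswith rest.toList (e ++ ['_']) =
          decide (e = rest.toList.takeWhile (· ≠ '_')) := by
      intro e he
      by_cases heq : e = rest.toList.takeWhile (· ≠ '_')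
      · rw [decide_eq_true heq]
        exact (PySem.Chars.startswith_iff _ _).mpr
          (by rw [hlsplit]; exact (prefix_sep_iff e _ tl he hpre).mpr heq)
      · rw [decide_eq_false heq, Bool.eq_false_iff]
        intro h
        exact heq ((prefix_sep_iff e _ tl he hpre).mp
          (by rw [← hlsplit]; exact (PySem.Chars.startswith_iff _ _).mp h))
    by_cases h1 : (['w', 'a', 't', 'e', 'r'] : List Char) = rest.toList.takeWhile (· ≠ '_')
    · have b1 := hcond ['w', 'a', 't', 'e', 'r'] (by decide)
      rw [decide_eq_true h1] at b1
      simp only [List.cons_append, List.nil_append] at b1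
      have n2 : ¬ (['a', 'i', 'r'] : List Char) = rest.toList.takeWhile (· ≠ '_') :=
        fun h => absurd (h.trans h1.symm) (by decide)
      have b2 := hcond ['a', 'i', 'r'] (by decide)
      rw [decide_eq_false n2] at b2
      simp only [List.cons_append, List.nil_append] at b2
      have n3 : ¬ (['e', 'a', 'r', 't', 'h'] : List Char) = rest.toList.takeWhile (· ≠ '_') :=
        fun h => absurd (h.trans h1.symm) (by decide)
      have b3 := hcond ['e', 'a', 'r', 't', 'h'] (by decide)
      rw [decide_eq_false n3] at b3
      simp only [List.cons_append, List.nil_append] at b3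
      have n4 : ¬ (['f', 'i', 'r', 'e'] : List Char) = rest.toList.takeWhile (· ≠ '_') :=
        fun h => absurd (h.trans h1.symm) (by decide)
      have b4 := hcond ['f', 'i', 'r', 'e'] (by decide)
      rw [decide_eq_false n4] at b4
      simp only [List.cons_append, List.nil_append] at b4
      have n5 : ¬ (['l', 'i', 'f', 'e'] : List Char) = rest.toList.takeWhile (· ≠ '_') :=
        fun h => absurd (h.trans h1.symm) (by decide)
      have b5 := hcond ['l', 'i', 'f', 'e'] (by decide)
      rw [decide_eq_false n5] at b5
      simp only [List.cons_append, List.nil_append] at b5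
      have hs := slice_after rest ['w', 'a', 't', 'e', 'r'] tl (by rw [hlsplit, ← h1]) 6 (by norm_num)
      have h' := h1
      simp only [ne_eq, decide_not] at h'
      simp [fragLoopA, fragValidateB, b1, b2, b3, b4, b5, ← h', hs.2,
        (by decide : (['w', 'a', 't', 'e', 'r'] : List Char) ∈ fragElementsB),
        (by decide : String.ofList ['w', 'a', 't', 'e', 'r'] = "water")]
    · by_cases h2 : (['a', 'i', 'r'] : List Char) = rest.toList.takeWhile (· ≠ '_')
      · have n1 : ¬ (['w', 'a', 't', 'e', 'r'] : List Char) = rest.toList.takeWhile (· ≠ '_') :=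
          fun h => absurd (h.trans h2.symm) (by decide)
        have b1 := hcond ['w', 'a', 't', 'e', 'r'] (by decide)
        rw [decide_eq_false n1] at b1
        simp only [List.cons_append, List.nil_append] at b1
        have b2 := hcond ['a', 'i', 'r'] (by decide)
        rw [decide_eq_true h2] at b2
        simp only [List.cons_append, List.nil_append] at b2
        have n3 : ¬ (['e', 'a', 'r', 't', 'h'] : List Char) = rest.toList.takeWhile (· ≠ '_') :=
          fun h => absurd (h.trans h2.symm) (by decide)
        have b3 := hcond ['e', 'a', 'r', 't', 'h'] (by decide)
        rw [decide_eq_false n3] at b3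
        simp only [List.cons_append, List.nil_append] at b3
        have n4 : ¬ (['f', 'i', 'r', 'e'] : List Char) = rest.toList.takeWhile (· ≠ '_') :=
          fun h => absurd (h.trans h2.symm) (by decide)
        have b4 := hcond ['f', 'i', 'r', 'e'] (by decide)
        rw [decide_eq_false n4] at b4
        simp only [List.cons_append, List.nil_append] at b4
        have n5 : ¬ (['l', 'i', 'f', 'e'] : List Char) = rest.toList.takeWhile (· ≠ '_') :=
          fun h => absurd (h.trans h2.symm) (by decide)
        have b5 := hcond ['l', 'i', 'f', 'e'] (by decide)
        rw [decide_eq_false n5] at b5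
        simp only [List.cons_append, List.nil_append] at b5
        have hs := slice_after rest ['a', 'i', 'r'] tl (by rw [hlsplit, ← h2]) 4 (by norm_num)
        have h' := h2
        simp only [ne_eq, decide_not] at h'
        simp [fragLoopA, fragValidateB, b1, b2, b3, b4, b5, ← h', hs.2,
          (by decide : (['a', 'i', 'r'] : List Char) ∈ fragElementsB),
          (by decide : String.ofList ['a', 'i', 'r'] = "air")]
      · by_cases h3 : (['e', 'a', 'r', 't', 'h'] : List Char) = rest.toList.takeWhile (· ≠ '_')
        · have n1 : ¬ (['w', 'a', 't', 'e', 'r'] : List Char) = rest.toList.takeWhile (· ≠ '_') :=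
            fun h => absurd (h.trans h3.symm) (by decide)
          have b1 := hcond ['w', 'a', 't', 'e', 'r'] (by decide)
          rw [decide_eq_false n1] at b1
          simp only [List.cons_append, List.nil_append] at b1
          have n2 : ¬ (['a', 'i', 'r'] : List Char) = rest.toList.takeWhile (· ≠ '_') :=
            fun h => absurd (h.trans h3.symm) (by decide)
          have b2 := hcond ['a', 'i', 'r'] (by decide)
          rw [decide_eq_false n2] at b2
          simp only [List.cons_append, List.nil_append] at b2
          have b3 := hcond ['e', 'a', 'r', 't', 'h'] (by decide)
          rw [decide_eq_true h3] at b3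
          simp only [List.cons_append, List.nil_append] at b3
          have n4 : ¬ (['f', 'i', 'r', 'e'] : List Char) = rest.toList.takeWhile (· ≠ '_') :=
            fun h => absurd (h.trans h3.symm) (by decide)
          have b4 := hcond ['f', 'i', 'r', 'e'] (by decide)
          rw [decide_eq_false n4] at b4
          simp only [List.cons_append, List.nil_append] at b4
          have n5 : ¬ (['l', 'i', 'f', 'e'] : List Char) = rest.toList.takeWhile (· ≠ '_') :=
            fun h => absurd (h.trans h3.symm) (by decide)
          have b5 := hcond ['l', 'i', 'f', 'e'] (by decide)
          rw [decide_eq_false n5] at b5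
          simp only [List.cons_append, List.nil_append] at b5
          have hs := slice_after rest ['e', 'a', 'r', 't', 'h'] tl (by rw [hlsplit, ← h3]) 6 (by norm_num)
          have h' := h3
          simp only [ne_eq, decide_not] at h'
          simp [fragLoopA, fragValidateB, b1, b2, b3, b4, b5, ← h', hs.2,
            (by decide : (['e', 'a', 'r', 't', 'h'] : List Char) ∈ fragElementsB),
            (by decide : String.ofList ['e', 'a', 'r', 't', 'h'] = "earth")]
        · by_cases h4 : (['f', 'i', 'r', 'e'] : List Char) = rest.toList.takeWhile (· ≠ '_')
          · have n1 : ¬ (['w', 'a', 't', 'e', 'r'] : List Char) = rest.toList.takeWhile (· ≠ '_') :=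
              fun h => absurd (h.trans h4.symm) (by decide)
            have b1 := hcond ['w', 'a', 't', 'e', 'r'] (by decide)
            rw [decide_eq_false n1] at b1
            simp only [List.cons_append, List.nil_append] at b1
            have n2 : ¬ (['a', 'i', 'r'] : List Char) = rest.toList.takeWhile (· ≠ '_') :=
              fun h => absurd (h.trans h4.symm) (by decide)
            have b2 := hcond ['a', 'i', 'r'] (by decide)
            rw [decide_eq_false n2] at b2
            simp only [List.cons_append, List.nil_append] at b2
            have n3 : ¬ (['e', 'a', 'r', 't', 'h'] : List Char) = rest.toList.takeWhile (· ≠ '_') :=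
              fun h => absurd (h.trans h4.symm) (by decide)
            have b3 := hcond ['e', 'a', 'r', 't', 'h'] (by decide)
            rw [decide_eq_false n3] at b3
            simp only [List.cons_append, List.nil_append] at b3
            have b4 := hcond ['f', 'i', 'r', 'e'] (by decide)
            rw [decide_eq_true h4] at b4
            simp only [List.cons_append, List.nil_append] at b4
            have n5 : ¬ (['l', 'i', 'f', 'e'] : List Char) = rest.toList.takeWhile (· ≠ '_') :=
              fun h => absurd (h.trans h4.symm) (by decide)
            have b5 := hcond ['l', 'i', 'f', 'e'] (by decide)
            rw [decide_eq_false n5] at b5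
            simp only [List.cons_append, List.nil_append] at b5
            have hs := slice_after rest ['f', 'i', 'r', 'e'] tl (by rw [hlsplit, ← h4]) 5 (by norm_num)
            have h' := h4
            simp only [ne_eq, decide_not] at h'
            simp [fragLoopA, fragValidateB, b1, b2, b3, b4, b5, ← h', hs.2,
              (by decide : (['f', 'i', 'r', 'e'] : List Char) ∈ fragElementsB),
              (by decide : String.ofList ['f', 'i', 'r', 'e'] = "fire")]
          · by_cases h5 : (['l', 'i', 'f', 'e'] : List Char) = rest.toList.takeWhile (· ≠ '_')
            · have n1 : ¬ (['w', 'a', 't', 'e', 'r'] : List Char) = rest.toList.takeWhile (· ≠ '_') :=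
                fun h => absurd (h.trans h5.symm) (by decide)
              have b1 := hcond ['w', 'a', 't', 'e', 'r'] (by decide)
              rw [decide_eq_false n1] at b1
              simp only [List.cons_append, List.nil_append] at b1
              have n2 : ¬ (['a', 'i', 'r'] : List Char) = rest.toList.takeWhile (· ≠ '_') :=
                fun h => absurd (h.trans h5.symm) (by decide)
              have b2 := hcond ['a', 'i', 'r'] (by decide)
              rw [decide_eq_false n2] at b2
              simp only [List.cons_append, List.nil_append] at b2
              have n3 : ¬ (['e', 'a', 'r', 't', 'h'] : List Char) = rest.toList.takeWhile (· ≠ '_') :=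
                fun h => absurd (h.trans h5.symm) (by decide)
              have b3 := hcond ['e', 'a', 'r', 't', 'h'] (by decide)
              rw [decide_eq_false n3] at b3
              simp only [List.cons_append, List.nil_append] at b3
              have n4 : ¬ (['f', 'i', 'r', 'e'] : List Char) = rest.toList.takeWhile (· ≠ '_') :=
                fun h => absurd (h.trans h5.symm) (by decide)
              have b4 := hcond ['f', 'i', 'r', 'e'] (by decide)
              rw [decide_eq_false n4] at b4
              simp only [List.cons_append, List.nil_append] at b4
              have b5 := hcond ['l', 'i', 'f', 'e'] (by decide)
              rw [decide_eq_true h5] at b5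
              simp only [List.cons_append, List.nil_append] at b5
              have hs := slice_after rest ['l', 'i', 'f', 'e'] tl (by rw [hlsplit, ← h5]) 5 (by norm_num)
              have h' := h5
              simp only [ne_eq, decide_not] at h'
              simp [fragLoopA, fragValidateB, b1, b2, b3, b4, b5, ← h', hs.2,
                (by decide : (['l', 'i', 'f', 'e'] : List Char) ∈ fragElementsB),
                (by decide : String.ofList ['l', 'i', 'f', 'e'] = "life")]
            · have b1 := hcond ['w', 'a', 't', 'e', 'r'] (by decide)
              rw [decide_eq_false h1] at b1
              simp only [List.cons_append, List.nil_append] at b1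
              have b2 := hcond ['a', 'i', 'r'] (by decide)
              rw [decide_eq_false h2] at b2
              simp only [List.cons_append, List.nil_append] at b2
              have b3 := hcond ['e', 'a', 'r', 't', 'h'] (by decide)
              rw [decide_eq_false h3] at b3
              simp only [List.cons_append, List.nil_append] at b3
              have b4 := hcond ['f', 'i', 'r', 'e'] (by decide)
              rw [decide_eq_false h4] at b4
              simp only [List.cons_append, List.nil_append] at b4
              have b5 := hcond ['l', 'i', 'f', 'e'] (by decide)
              rw [decide_eq_false h5] at b5
              simp only [List.cons_append, List.nil_append] at b5
              have mnone : rest.toList.takeWhile (· ≠ '_') ∉ fragElementsB := by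
                intro h
                simp only [ne_eq, decide_not] at h1 h2 h3 h4 h5
                simp [fragElementsB] at h
                rcases h with h | h | h | h | h
                exacts [h1 h.symm, h2 h.symm, h3 h.symm, h4 h.symm, h5 h.symm]
              simp only [ne_eq, decide_not] at mnone
              simp [fragLoopA, fragValidateB, b1, b2, b3, b4, b5, mnone]

theorem toList_slice_five (name : String) :
    (PySem.Str.slice name (some 5) none).toList = name.toList.drop 5 := by
  rw [PySem.Str.toList_slice, PySem.Chars.slice_eq_listSlice]
  exact PySem.List.slice_from_natCast name.toList 5

-- ===== VERDICT (by name: the statement is the Claim_ definition above) =====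
theorem frag_parts_py_spec : Claim_equal_frag_parts_py := by
  intro name _
  unfold Spec_frag_parts_py frag_parts_py frag_parts_py_alt
  by_cases hs : PySem.Str.startswith name "frag_" = true
  · rw [if_neg (by simpa using hs), if_neg (by simpa using hs), loopA_eq_partition,
      toList_slice_five]
  · rw [if_pos (by simpa using hs), if_pos (by simpa using hs)]
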